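-- pv_equiv track=rewrite | github.com/security-cocktail-hour/security-cocktail-hour-website | scripts/tests/test_helpers.py | select_episodes_to_test
-- ===== SOURCE A (Python) =====
-- def select_episodes_to_test(all_episodes, newest_count=5):
--     """
--     Smart episode selection:
--     - Newest N episodes
--     - One from each block of 10 older episodes (middle episode from each block)
--     Returns: list of episodes to test
--     """
--     if not all_episodes:
--         return []
--
--     # Get newest episodes
--     newest = all_episodes[:newest_count]
--
--     # Get older episodes (everything after newest)
--     older = all_episodes[newest_count:]
--
--     # Group older episodes into blocks of 10
--     block_samples = []
--     if older:
--         # Determine how many blocks we have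
--         max_episode_num = max(ep['episode_num'] for ep in older)
--         min_episode_num = min(ep['episode_num'] for ep in older)
--
--         # Create blocks: 1-10, 11-20, 21-30, etc.
--         for block_start in range(1, max_episode_num + 1, 10):
--             block_end = block_start + 9
--             block_episodes = [ep for ep in older if block_start <= ep['episode_num'] <= block_end]
--
--             if block_episodes:
--                 # Pick the middle episode from this block
--                 mid_index = len(block_episodes) // 2
--                 block_samples.append(block_episodes[mid_index])
--
--     return newest + block_samples
-- ===== SOURCE B (Python) =====
-- def select_episodes_to_test(all_episodes, newest_count=5):
--     """Single grouping pass: key each older episode by its decade bucket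
--     (episode_num - 1) // 10, collect the buckets in a dict in one pass, then
--     emit the middle episode of each bucket in ascending key order.  No per-block
--     rescan of the older list and no iteration over empty blocks."""
--     newest = all_episodes[:newest_count]
--     older = all_episodes[newest_count:]
--     keyed = [((ep['episode_num'] - 1) // 10, ep) for ep in older
--              if ep['episode_num'] >= 1]
--     buckets = {}
--     for b, ep in keyed:
--         buckets.setdefault(b, []).append(ep)
--     result = list(newest)
--     for b in sorted(buckets):
--         blk = buckets[b]
--         result.append(blk[len(blk) // 2])
--     return result
-- ===== Notes on version B (the rewrite author's own statement) =====
-- stated objective: alternative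
-- what changed: A rescans the whole older list once per block 1-10, 11-20, ... up to max(episode_num); B makes ONE grouping pass that buckets each older episode into a dict keyed by (episode_num-1)//10, then emits the middle of each bucket in sorted key order, so there are no per-block rescans and no iteration over empty blocks.
import Mathlib
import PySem

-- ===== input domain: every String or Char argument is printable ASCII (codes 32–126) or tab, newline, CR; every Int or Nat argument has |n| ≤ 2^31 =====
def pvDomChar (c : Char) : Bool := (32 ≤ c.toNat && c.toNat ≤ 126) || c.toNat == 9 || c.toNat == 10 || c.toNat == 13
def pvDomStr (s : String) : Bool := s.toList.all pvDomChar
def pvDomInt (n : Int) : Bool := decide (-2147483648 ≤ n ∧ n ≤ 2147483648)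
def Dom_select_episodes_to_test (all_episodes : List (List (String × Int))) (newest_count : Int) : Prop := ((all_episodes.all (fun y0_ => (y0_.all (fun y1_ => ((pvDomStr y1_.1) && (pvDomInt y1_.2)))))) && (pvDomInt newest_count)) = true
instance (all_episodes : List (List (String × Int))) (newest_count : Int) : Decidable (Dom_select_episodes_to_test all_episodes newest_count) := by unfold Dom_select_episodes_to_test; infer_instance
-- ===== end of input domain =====

-- B replaces A's rescan of the older list for every block 1-10, 11-20, … up to
-- max(episode_num) by ONE grouping pass into a bucket dict keyed by (num-1)//10,
-- then walks the sorted bucket keys. Equivalence is about the return value only.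

-- ===== PORT A =====
-- ep['episode_num'] (total form; Pre_ guarantees the key is present)
def pvEpNum (ep : List (String × Int)) : Int := (ep.lookup "episode_num").getD 0

def select_episodes_to_test (all_episodes : List (List (String × Int))) (newest_count : Int) : List (List (String × Int)) :=
  if all_episodes = [] then []
  else
    let newest := PySem.List.slice all_episodes none (some newest_count)
    let older := PySem.List.slice all_episodes (some newest_count) none
    let block_samples :=
      if older = [] then []
      else
        let max_episode_num := (PySem.List.max? (older.map pvEpNum) (fun x => x)).getD 0
        let _min_episode_num := (PySem.List.min? (older.map pvEpNum) (fun x => x)).getD 0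
        (PySem.List.pyRange 1 (max_episode_num + 1) 10).foldl
          (fun acc block_start =>
            let block_end := block_start + 9
            let block_episodes := older.filter
              (fun ep => decide (block_start ≤ pvEpNum ep) && decide (pvEpNum ep ≤ block_end))
            if block_episodes.isEmpty then acc
            else acc ++ [block_episodes.getD (block_episodes.length / 2) []]) []
    newest ++ block_samples

-- ===== PORT B =====
def select_episodes_to_test_alt (all_episodes : List (List (String × Int))) (newest_count : Int) : List (List (String × Int)) :=
  let newest := PySem.List.slice all_episodes none (some newest_count)
  let older := PySem.List.slice all_episodes (some newest_count) none
  let keyed := older.filterMap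
    (fun ep => if 1 ≤ pvEpNum ep then some (PySem.Int.floordiv (pvEpNum ep - 1) 10, ep) else none)
  let buckets := keyed.foldl
    (fun d p => d.modify p.1 [] (fun v => v ++ [p.2])) PySem.Dict.empty
  newest ++ (PySem.List.sorted buckets.keys (fun x => x)).map (fun b =>
    let blk := buckets.getD b []
    blk.getD (blk.length / 2) [])

-- ===== PRECONDITION & SPEC =====
-- Pre_ excludes exactly the inputs where Python A raises KeyError: an episode past the
-- newest slice without the 'episode_num' key.
def Pre_select_episodes_to_test (all_episodes : List (List (String × Int))) (newest_count : Int) : Prop :=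
  ((PySem.List.slice all_episodes (some newest_count) none).all
    (fun ep => (ep.lookup "episode_num").isSome)) = true
instance (all_episodes : List (List (String × Int))) (newest_count : Int) : Decidable (Pre_select_episodes_to_test all_episodes newest_count) := by unfold Pre_select_episodes_to_test; infer_instance

def pvWitness_select_episodes_to_test : (List (List (String × Int))) × Int :=
  ([[("episode_num", 12)], [("episode_num", 3)], [("episode_num", 27)]], 1)

def Spec_select_episodes_to_test (all_episodes : List (List (String × Int))) (newest_count : Int) (out : List (List (String × Int))) : Prop := out = select_episodes_to_test_alt all_episodes newest_count
instance (all_episodes : List (List (String × Int))) (newest_count : Int) (out : List (List (String × Int))) : Decidable (Spec_select_episodes_to_test all_episodes newest_count out) := by unfold Spec_select_episodes_to_test; infer_instance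

-- ===== CLAIM (what is proved, stated in full; the proofs are below) =====
def Claim_equal_select_episodes_to_test : Prop := ∀ (all_episodes : List (List (String × Int))) (newest_count : Int), Dom_select_episodes_to_test all_episodes newest_count → Pre_select_episodes_to_test all_episodes newest_count → Spec_select_episodes_to_test all_episodes newest_count (select_episodes_to_test all_episodes newest_count)

-- ===== LEMMAS AND PROOFS =====

-- the block of episodes whose number lies in [s, s+9] (A's block_episodes)
def pvBlk (older : List (List (String × Int))) (s : Int) : List (List (String × Int)) :=
  older.filter (fun ep => decide (s ≤ pvEpNum ep) && decide (pvEpNum ep ≤ s + 9))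

-- B's bucket-index multiset (first components of keyed)
def pvKs (older : List (List (String × Int))) : List Int :=
  older.filterMap (fun ep => if 1 ≤ pvEpNum ep then some (PySem.Int.floordiv (pvEpNum ep - 1) 10) else none)

-- B's keyed list
def pvKeyed (older : List (List (String × Int))) : List (Int × List (String × Int)) :=
  older.filterMap
    (fun ep => if 1 ≤ pvEpNum ep then some (PySem.Int.floordiv (pvEpNum ep - 1) 10, ep) else none)

lemma pv_keyed_map_fst (older : List (List (String × Int))) :
    (pvKeyed older).map (fun p => p.1) = pvKs older := by
  simp only [pvKeyed, pvKs, List.map_filterMap]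
  refine List.filterMap_congr (fun ep _ => ?_)
  by_cases h : 1 ≤ pvEpNum ep <;> simp [h]

lemma pv_mem_ks (older : List (List (String × Int))) (b : Int) :
    b ∈ pvKs older ↔ ∃ ep ∈ older, 1 ≤ pvEpNum ep ∧ PySem.Int.floordiv (pvEpNum ep - 1) 10 = b := by
  simp only [pvKs, List.mem_filterMap]
  constructor
  · rintro ⟨ep, hmem, hsome⟩
    by_cases h1 : 1 ≤ pvEpNum ep
    · rw [if_pos h1] at hsome
      exact ⟨ep, hmem, h1, Option.some.inj hsome⟩
    · rw [if_neg h1] at hsome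
      cases hsome
  · rintro ⟨ep, hmem, h1, hfd⟩
    exact ⟨ep, hmem, by rw [if_pos h1, hfd]⟩

lemma pv_mem_ks_nonneg (older : List (List (String × Int))) (b : Int) (hb : b ∈ pvKs older) : 0 ≤ b := by
  rw [pv_mem_ks] at hb
  obtain ⟨ep, _, h1, hfd⟩ := hb
  rw [PySem.Int.floordiv_eq_iff_of_pos (by norm_num)] at hfd
  omega

-- the bucket list of key b (b ≥ 0) is A's block for block_start = 10*b + 1
lemma pv_bucket_eq (older : List (List (String × Int))) (b : Int) (hb : 0 ≤ b) :
    ((pvKeyed older).filter (fun p => p.1 == b)).map (fun p => p.2) = pvBlk older (10 * b + 1) := by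
  induction older with
  | nil => rfl
  | cons ep rest ih =>
    have hfd : PySem.Int.floordiv (pvEpNum ep - 1) 10 = b ↔
        10 * b + 1 ≤ pvEpNum ep ∧ pvEpNum ep ≤ 10 * b + 10 := by
      rw [PySem.Int.floordiv_eq_iff_of_pos (by norm_num : (0:Int) < 10)]
      omega
    simp only [pvKeyed, pvBlk, List.filterMap_cons] at ih ⊢
    by_cases h1 : 1 ≤ pvEpNum ep
    · rw [if_pos h1]
      by_cases h2 : 10 * b + 1 ≤ pvEpNum ep ∧ pvEpNum ep ≤ 10 * b + 10
      · rw [List.filter_cons_of_pos (by simpa using hfd.2 h2), List.map_cons,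
          List.filter_cons_of_pos
            (by simp only [Bool.and_eq_true, decide_eq_true_eq]; omega), ih]
      · have hne : PySem.Int.floordiv (pvEpNum ep - 1) 10 ≠ b := fun h => h2 (hfd.1 h)
        rw [List.filter_cons_of_neg (by simpa using hne),
          List.filter_cons_of_neg
            (by simp only [Bool.and_eq_true, decide_eq_true_eq]; omega), ih]
    · rw [if_neg h1,
        List.filter_cons_of_neg
          (by simp only [Bool.and_eq_true, decide_eq_true_eq]; omega), ih]

-- the sorted occupied-bucket list equals A's kept block starts mapped to bucket indices
lemma pv_keys_eq (older : List (List (String × Int))) (mx : Int)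
    (hmax : PySem.List.max? (older.map pvEpNum) (fun x => x) = some mx) :
    PySem.List.sorted (PySem.Set.ofList (pvKs older)) (fun x => x)
      = ((PySem.List.pyRange 1 (mx + 1) 10).filter (fun s => !(pvBlk older s).isEmpty)).map
          (fun s => PySem.Int.floordiv (s - 1) 10) := by
  have h10 : (0:Int) < 10 := by norm_num
  rw [PySem.List.pyRange_of_pos 1 (mx + 1) h10, List.filter_map, List.map_map]
  have hmc : ∀ l : List Nat,
      l.map ((fun s => PySem.Int.floordiv (s - 1) 10) ∘ (fun k : Nat => 1 + 10 * (k:Int)))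
        = l.map (fun k : Nat => (k:Int)) := by
    intro l
    refine List.map_congr_left (fun a _ => ?_)
    simp [Function.comp]
  rw [hmc]
  set m : Nat := (if (1:Int) < mx + 1 then ((mx + 1 - 1 + 10 - 1) / 10).toNat else 0) with hm
  set q : Nat → Bool := ((fun s => !(pvBlk older s).isEmpty) ∘ (fun k : Nat => 1 + 10 * (k:Int))) with hq
  have hpw : (((List.range m).filter q).map (fun k : Nat => (k:Int))).Pairwise
      (fun a b => (fun x => x) a < (fun x => x) b) := by
    rw [List.pairwise_map]
    exact (List.pairwise_lt_range.filter q).imp (fun h => Nat.cast_lt.mpr h)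
  apply PySem.List.sorted_eq_of_perm_of_pairwise_lt _ _ _ ?_ hpw
  rw [List.perm_ext_iff_of_nodup (hpw.imp ne_of_lt) (PySem.Set.nodup_ofList _)]
  intro b
  rw [PySem.Set.mem_ofList, pv_mem_ks]
  simp only [List.mem_map, List.mem_filter, List.mem_range]
  have hblk : ∀ k : Nat, q k = true ↔ ∃ ep ∈ older, 1 + 10 * (k:Int) ≤ pvEpNum ep ∧ pvEpNum ep ≤ 1 + 10 * (k:Int) + 9 := by
    intro k
    have h1 : q k = true ↔ pvBlk older (1 + 10 * (k:Int)) ≠ [] := by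
      rw [hq]
      simp
    rw [h1, Ne, pvBlk, List.filter_eq_nil_iff]
    simp only [Bool.and_eq_true, decide_eq_true_eq, not_forall]
    constructor
    · rintro ⟨ep, hmem, hp⟩
      exact ⟨ep, hmem, not_not.1 hp⟩
    · rintro ⟨ep, hmem, hlo, hhi⟩
      exact ⟨ep, hmem, not_not.2 ⟨hlo, hhi⟩⟩
  constructor
  · rintro ⟨k, ⟨hk, hqk⟩, hkb⟩
    rw [hblk] at hqk
    obtain ⟨ep, hmem, hlo, hhi⟩ := hqk
    refine ⟨ep, hmem, by omega, ?_⟩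
    rw [PySem.Int.floordiv_eq_iff_of_pos h10]
    omega
  · rintro ⟨ep, hmem, h1, hfd⟩
    have hb0 : 0 ≤ b := pv_mem_ks_nonneg older b ((pv_mem_ks older b).2 ⟨ep, hmem, h1, hfd⟩)
    have hle : pvEpNum ep ≤ mx := PySem.List.max?_isMax hmax _ (List.mem_map_of_mem hmem)
    have hbd := (PySem.Int.floordiv_eq_iff_of_pos h10).1 hfd
    refine ⟨b.toNat, ⟨?_, ?_⟩, by omega⟩
    · rw [hm]
      rw [if_pos (by omega)]
      omega
    · rw [hblk]
      exact ⟨ep, hmem, by omega, by omega⟩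

lemma pv_foldA (older : List (List (String × Int))) (hi : Int) :
    (PySem.List.pyRange 1 hi 10).foldl
      (fun acc block_start =>
        let block_end := block_start + 9
        let block_episodes := older.filter
          (fun ep => decide (block_start ≤ pvEpNum ep) && decide (pvEpNum ep ≤ block_end))
        if block_episodes.isEmpty then acc
        else acc ++ [block_episodes.getD (block_episodes.length / 2) []]) []
    = ((PySem.List.pyRange 1 hi 10).filter (fun s => !(pvBlk older s).isEmpty)).map
        (fun s => (pvBlk older s).getD ((pvBlk older s).length / 2) []) := by
  have hfun : (fun (acc : List (List (String × Int))) (block_start : Int) =>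
        let block_end := block_start + 9
        let block_episodes := older.filter
          (fun ep => decide (block_start ≤ pvEpNum ep) && decide (pvEpNum ep ≤ block_end))
        if block_episodes.isEmpty then acc
        else acc ++ [block_episodes.getD (block_episodes.length / 2) []])
      = (fun acc s =>
          if (fun s => !(pvBlk older s).isEmpty) s = true
          then acc ++ [(fun s => (pvBlk older s).getD ((pvBlk older s).length / 2) []) s]
          else acc) := by
    funext acc s
    show (if (pvBlk older s).isEmpty then acc
          else acc ++ [(pvBlk older s).getD ((pvBlk older s).length / 2) []])
        = (if ((!(pvBlk older s).isEmpty) = true)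
           then acc ++ [(pvBlk older s).getD ((pvBlk older s).length / 2) []]
           else acc)
    by_cases h : (pvBlk older s).isEmpty <;> simp [h]
  rw [hfun, PySem.List.foldl_append_if]
  simp

-- B's port, rewritten to the sorted occupied-bucket form used by the lemmas above
lemma pv_alt_eq (all : List (List (String × Int))) (nc : Int) :
    select_episodes_to_test_alt all nc
      = PySem.List.slice all none (some nc)
        ++ (PySem.List.sorted (PySem.Set.ofList (pvKs (PySem.List.slice all (some nc) none))) (fun x => x)).map
            (fun b =>
              (pvBlk (PySem.List.slice all (some nc) none) (10 * b + 1)).getD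
                ((pvBlk (PySem.List.slice all (some nc) none) (10 * b + 1)).length / 2) []) := by
  set older := PySem.List.slice all (some nc) none with hold
  have hkeys : ((pvKeyed older).foldl
      (fun d p => d.modify p.1 [] (fun v => v ++ [p.2])) PySem.Dict.empty).keys
      = PySem.Set.ofList (pvKs older) := by
    rw [PySem.Dict.keys_foldl_modify_key (pvKeyed older) (fun p => p.1) []
      (fun _ p => fun v => v ++ [p.2]) PySem.Dict.empty]
    rw [PySem.Dict.keys_empty, PySem.Set.update_nil_left, pv_keyed_map_fst]
  have h0 : select_episodes_to_test_alt all nc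
      = PySem.List.slice all none (some nc)
        ++ (PySem.List.sorted ((pvKeyed older).foldl
              (fun d p => d.modify p.1 [] (fun v => v ++ [p.2])) PySem.Dict.empty).keys
            (fun x => x)).map
          (fun b =>
            (((pvKeyed older).foldl
                (fun d p => d.modify p.1 [] (fun v => v ++ [p.2])) PySem.Dict.empty).getD b []).getD
              ((((pvKeyed older).foldl
                (fun d p => d.modify p.1 [] (fun v => v ++ [p.2])) PySem.Dict.empty).getD b []).length / 2)
              []) := rfl
  rw [h0, hkeys]
  congr 1
  refine List.map_congr_left (fun b hb => ?_)
  have hbmem : b ∈ pvKs older := by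
    rw [PySem.List.mem_sorted] at hb
    exact (PySem.Set.mem_ofList _ _).1 hb
  have hb0 : 0 ≤ b := pv_mem_ks_nonneg older b hbmem
  have hget : ((pvKeyed older).foldl
      (fun d p => d.modify p.1 [] (fun v => v ++ [p.2])) PySem.Dict.empty).getD b []
      = pvBlk older (10 * b + 1) := by
    rw [PySem.Dict.getD_foldl_modify_append (pvKeyed older) PySem.Dict.empty b]
    rw [PySem.Dict.getD_empty, List.nil_append, pv_bucket_eq older b hb0]
  rw [hget]

theorem select_episodes_to_test_spec : Claim_equal_select_episodes_to_test := by
  intro all nc _dom _pre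
  unfold Spec_select_episodes_to_test
  rw [pv_alt_eq]
  simp only [select_episodes_to_test]
  by_cases hall : all = []
  · subst hall
    simp [PySem.List.slice, pvKs, PySem.List.sorted_eq_nil_iff]
  · rw [if_neg hall]
    set older := PySem.List.slice all (some nc) none with hold
    by_cases hod : older = []
    · rw [if_pos hod, hod]
      simp [pvKs, PySem.List.sorted_eq_nil_iff]
    · rw [if_neg hod]
      obtain ⟨mx, hmax⟩ : ∃ mx, PySem.List.max? (older.map pvEpNum) (fun x => x) = some mx := by
        cases h : PySem.List.max? (older.map pvEpNum) (fun x => x) with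
        | none =>
          rw [PySem.List.max?_eq_none_iff, List.map_eq_nil_iff] at h
          exact absurd h hod
        | some v => exact ⟨v, rfl⟩
      rw [hmax]
      congr 1
      have hk := pv_keys_eq older mx hmax
      have hfA := pv_foldA older (mx + 1)
      simp only [Option.getD_some]
      rw [hfA, hk, List.map_map]
      refine List.map_congr_left (fun s hs => ?_)
      have hsr : s ∈ PySem.List.pyRange 1 (mx + 1) 10 := List.mem_of_mem_filter hs
      rw [PySem.List.mem_pyRange_iff_of_pos (by norm_num)] at hsr
      obtain ⟨hs1, _, hdvd⟩ := hsr
      have hfd : PySem.Int.floordiv (s - 1) 10 = (s - 1) / 10 :=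
        PySem.Int.floordiv_eq_ediv_of_pos (by norm_num)
      have hb1 : 10 * ((s - 1) / 10) + 1 = s := by omega
      simp only [Function.comp_apply, hfd, hb1]
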